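-- pv_equiv track=rewrite | github.com/volkerrath/Py4MTX | py4mt/modules/inv1d.py | _comp_indices
-- ===== SOURCE A (Python) =====
-- from typing import Dict, List, Mapping, Optional, Sequence, Tuple, Union
--
-- def _comp_indices(comps: Sequence[str]) -> List[Tuple[int, int]]:
--     """
--     Map component strings ("xx","xy","yx","yy") to tensor indices.
--
--     Parameters
--     ----------
--     comps
--         Component strings.
--
--     Returns
--     -------
--     list
--         List of (i,j) indices.
--     """
--     m = {"xx": (0, 0), "xy": (0, 1), "yx": (1, 0), "yy": (1, 1)}
--     idx: List[Tuple[int, int]] = []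
--     for c in comps:
--         cc = str(c).strip().lower()
--         if cc not in m:
--             raise ValueError(f"Unknown component '{c}'. Use xx, xy, yx, yy.")
--         idx.append(m[cc])
--     return idx
-- ===== SOURCE B (Python) =====
-- def _comp_indices(comps):
--     axis = {"x": 0, "y": 1}
--     idx = []
--     for c in comps:
--         cc = str(c).strip().lower()
--         if len(cc) == 2 and cc[0] in axis and cc[1] in axis:
--             idx.append((axis[cc[0]], axis[cc[1]]))
--         else:
--             raise ValueError(f"Unknown component '{c}'. Use xx, xy, yx, yy.")
--     return idx
-- ===== Notes on version B (the rewrite author's own statement) =====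
-- stated objective: simpler
-- what changed: B derives each index pair compositionally from the two characters via a 2-entry axis map {'x':0,'y':1} with a length/membership check, instead of A's full-string lookup in a 4-entry tuple table.
import Mathlib
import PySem

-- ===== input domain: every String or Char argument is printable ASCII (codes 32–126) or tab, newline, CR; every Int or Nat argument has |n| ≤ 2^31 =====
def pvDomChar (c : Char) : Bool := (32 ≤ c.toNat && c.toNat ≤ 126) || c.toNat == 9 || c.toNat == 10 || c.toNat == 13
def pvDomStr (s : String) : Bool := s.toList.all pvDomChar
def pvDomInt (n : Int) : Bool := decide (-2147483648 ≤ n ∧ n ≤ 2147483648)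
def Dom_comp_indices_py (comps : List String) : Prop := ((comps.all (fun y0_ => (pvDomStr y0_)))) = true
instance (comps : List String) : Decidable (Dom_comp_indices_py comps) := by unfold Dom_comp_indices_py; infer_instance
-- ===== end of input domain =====

-- B maps each component via a 2-entry axis table applied to its two characters instead of
-- A's 4-entry full-string table; same values, same ValueError on the same inputs (objective: simpler).

-- ===== PORT A =====
-- the dict m from A
def compTableA : PySem.Dict String (Int × Int) :=
  PySem.Dict.ofList [("xx", (0, 0)), ("xy", (0, 1)), ("yx", (1, 0)), ("yy", (1, 1))]

-- the for-loop of A; on an unknown component A raises (excluded by Pre_), the port stops there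
def comp_indices_py (comps : List String) : List (Int × Int) :=
  match comps with
  | [] => []
  | c :: rest =>
    let cc := PySem.Str.lower (PySem.Str.strip c)
    match compTableA.get? cc with
    | none => []          -- Python: raise ValueError (outside Pre_)
    | some v => v :: comp_indices_py rest

-- ===== PORT B =====
-- axis = {"x": 0, "y": 1}, looked up per character
def axisB : PySem.Dict String Int := PySem.Dict.ofList [("x", 0), ("y", 1)]

def comp_indices_py_alt (comps : List String) : List (Int × Int) :=
  match comps with
  | [] => []
  | c :: rest =>
    let cc := PySem.Str.lower (PySem.Str.strip c)
    match cc.toList with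
    | [a, b] =>
      match axisB.get? (String.ofList [a]), axisB.get? (String.ofList [b]) with
      | some i, some j => (i, j) :: comp_indices_py_alt rest
      | _, _ => []      -- Python: raise ValueError (outside Pre_)
    | _ => []           -- Python: raise ValueError (outside Pre_)

-- ===== PRECONDITION & SPEC =====
-- Pre_ excludes exactly the inputs on which A raises ValueError: a component whose
-- stripped lowercase form is not one of "xx","xy","yx","yy".
def Pre_comp_indices_py (comps : List String) : Prop :=
  ∀ c ∈ comps, PySem.Str.lower (PySem.Str.strip c) ∈ (["xx", "xy", "yx", "yy"] : List String)
instance (comps : List String) : Decidable (Pre_comp_indices_py comps) := by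
  unfold Pre_comp_indices_py; infer_instance

def pvWitness_comp_indices_py : List String := ["xx", " XY ", "yx", "YY"]

def Spec_comp_indices_py (comps : List String) (out : List (Int × Int)) : Prop := out = comp_indices_py_alt comps
instance (comps : List String) (out : List (Int × Int)) : Decidable (Spec_comp_indices_py comps out) := by unfold Spec_comp_indices_py; infer_instance

-- ===== CLAIM (what is proved, stated in full; the proofs are below) =====
def Claim_equal_comp_indices_py : Prop := ∀ (comps : List String), Dom_comp_indices_py comps → Pre_comp_indices_py comps → Spec_comp_indices_py comps (comp_indices_py comps)

-- ===== LEMMAS AND PROOFS =====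

-- ===== VERDICT (by name: the statement is the Claim_ definition above) =====
theorem comp_indices_py_spec : Claim_equal_comp_indices_py := by
  intro comps hdom hpre
  unfold Spec_comp_indices_py
  induction comps with
  | nil => rfl
  | cons c rest ih =>
    have hc := hpre c (by simp)
    have hr : Pre_comp_indices_py rest := fun x hx => hpre x (by simp [hx])
    have hdr : Dom_comp_indices_py rest := by
      simp only [Dom_comp_indices_py, List.all_cons, Bool.and_eq_true] at hdom
      exact hdom.2
    have ihr := ih hdr hr
    simp only [List.mem_cons, List.not_mem_nil, or_false] at hc
    rcases hc with h | h | h | h <;>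
      simp only [comp_indices_py, comp_indices_py_alt, h] <;>
      exact congrArg (List.cons _) ihr
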